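-- pv_equiv track=rewrite | github.com/selfreferencing/erdos-ternary-digits | correct_trace.py | multiply_by_4
-- ===== SOURCE A (Python) =====
-- def to_base3(n):
--     if n == 0:
--         return [0]
--     digits = []
--     while n > 0:
--         digits.append(n % 3)
--         n //= 3
--     return digits
--
-- def multiply_by_4(x):
--     """Multiply x by 4 in base 3, tracking the addition."""
--     digits = to_base3(x)
--
--     # 4 × x = x + 3x
--     # In terms of digits: add digits to (digits shifted left by 1)
--     # Which is: at position i, output = digits[i] + digits[i-1] + carry
--
--     # Extend digits to handle the extra position from multiplication
--     max_len = len(digits) + 2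
--     extended = digits + [0] * (max_len - len(digits))
--
--     result = []
--     carry = 0
--
--     for i in range(max_len):
--         d_i = extended[i]
--         d_prev = extended[i-1] if i > 0 else 0
--
--         total = d_i + d_prev + carry
--         out = total % 3
--         carry = total // 3
--
--         result.append(out)
--
--     # Remove trailing zeros
--     while len(result) > 1 and result[-1] == 0:
--         result.pop()
--
--     return result
-- ===== SOURCE B (Python) =====
-- def multiply_by_4(x):
--     """Multiply x by 4, returning base-3 digits (little-endian)."""
--     m = 4 * x
--     digits = []
--     while m > 0:
--         digits.append(m % 3)
--         m //= 3
--     return digits or [0]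
-- ===== Notes on version B (the rewrite author's own statement) =====
-- stated objective: simpler
-- what changed: B computes 4*x as an integer first and converts it to base 3 with the standard divmod loop, replacing A's digit-wise schoolbook addition of x + 3x with carries and trailing-zero trimming.
import Mathlib
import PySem

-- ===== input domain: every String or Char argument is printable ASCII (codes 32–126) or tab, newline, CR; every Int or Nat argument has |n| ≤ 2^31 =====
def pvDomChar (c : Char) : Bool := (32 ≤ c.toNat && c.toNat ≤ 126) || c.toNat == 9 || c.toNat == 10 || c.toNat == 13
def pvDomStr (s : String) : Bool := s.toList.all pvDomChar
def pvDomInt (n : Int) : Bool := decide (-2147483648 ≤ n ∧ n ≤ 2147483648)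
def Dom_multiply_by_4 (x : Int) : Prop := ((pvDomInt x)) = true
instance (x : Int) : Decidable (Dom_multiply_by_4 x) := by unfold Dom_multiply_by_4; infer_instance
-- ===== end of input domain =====

-- B replaces A's digit-wise schoolbook addition of x + 3x (with carries and
-- trailing-zero trimming) by computing m = 4*x first and converting m to base 3
-- with the standard divmod loop; objective: simpler.

-- ===== PORT A =====

-- while n > 0: digits.append(n % 3); n //= 3
def to_base3_loop (n : Int) (digits : List Int) : List Int :=
  if _h : n > 0 then
    to_base3_loop (PySem.Int.floordiv n 3) (digits ++ [PySem.Int.mod n 3])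
  else digits
termination_by n.toNat
decreasing_by
  simp only [PySem.Int.floordiv_eq_ediv_of_pos (by norm_num : (0:Int) < 3)]
  omega

def to_base3 (n : Int) : List Int :=
  if n = 0 then [0] else to_base3_loop n []

-- loop body of 'for i in range(max_len)'; extended[i] and extended[i-1] are
-- always in range there (i < max_len = len(extended), and i-1 only read for i > 0),
-- so pyGet? never returns none and the .getD 0 is exact.
def addStep (extended : List Int) (st : List Int × Int) (i : Int) : List Int × Int :=
  let d_i := (PySem.List.pyGet? extended i).getD 0
  let d_prev := if i > 0 then (PySem.List.pyGet? extended (i - 1)).getD 0 else 0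
  let total := d_i + d_prev + st.2
  (st.1 ++ [PySem.Int.mod total 3], PySem.Int.floordiv total 3)

-- while len(result) > 1 and result[-1] == 0: result.pop()
def trimZeros (result : List Int) : List Int :=
  if _h : result.length > 1 ∧ (PySem.List.pyGet? result (-1)).getD 0 = 0 then
    trimZeros result.dropLast
  else result
termination_by result.length
decreasing_by
  rcases result with _ | ⟨a, t⟩ <;> simp_all [List.length_dropLast]

def multiply_by_4 (x : Int) : List Int :=
  let digits := to_base3 x
  let max_len : Nat := digits.length + 2
  let extended := digits ++ List.replicate (max_len - digits.length) 0
  let res := (PySem.List.pyRange 0 (max_len : Int) 1).foldl (addStep extended) ([], 0)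
  trimZeros res.1

-- ===== PORT B =====

-- while m > 0: digits.append(m % 3); m //= 3
def b3_loop (m : Int) (digits : List Int) : List Int :=
  if _h : m > 0 then
    b3_loop (PySem.Int.floordiv m 3) (digits ++ [PySem.Int.mod m 3])
  else digits
termination_by m.toNat
decreasing_by
  simp only [PySem.Int.floordiv_eq_ediv_of_pos (by norm_num : (0:Int) < 3)]
  omega

def multiply_by_4_alt (x : Int) : List Int :=
  let digits := b3_loop (4 * x) []
  if digits = [] then [0] else digits   -- 'digits or [0]'

-- ===== PRECONDITION & SPEC =====
def Spec_multiply_by_4 (x : Int) (out : List Int) : Prop := out = multiply_by_4_alt x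
instance (x : Int) (out : List Int) : Decidable (Spec_multiply_by_4 x out) := by unfold Spec_multiply_by_4; infer_instance

-- ===== CLAIM (what is proved, stated in full; the proofs are below) =====
def Claim_equal_multiply_by_4 : Prop := ∀ (x : Int), Dom_multiply_by_4 x → Spec_multiply_by_4 x (multiply_by_4 x)

-- ===== LEMMAS AND PROOFS =====

-- base-3 little-endian value of a digit list
def ival : List Int → Int
  | [] => 0
  | d :: t => d + 3 * ival t

-- cast of Nat.digits 3
def D3 (m : Int) : List Int := (Nat.digits 3 m.toNat).map (Nat.cast : ℕ → ℤ)

lemma ival_append_singleton (l : List Int) (d : Int) :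
    ival (l ++ [d]) = ival l + d * 3 ^ l.length := by
  induction l with
  | nil => simp [ival]
  | cons a t ih => simp [ival, ih, pow_succ]; ring

lemma ival_nonneg (l : List Int) (h : ∀ d ∈ l, 0 ≤ d ∧ d < 3) : 0 ≤ ival l := by
  induction l with
  | nil => simp [ival]
  | cons a t ih =>
    have ha := h a (by simp)
    have ht : 0 ≤ ival t := ih (fun d hd => h d (by simp [hd]))
    simp [ival]; omega

lemma ival_map_cast (l : List ℕ) : ival (l.map (Nat.cast : ℕ → ℤ)) = (Nat.ofDigits 3 l : ℕ) := by
  induction l with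
  | nil => simp [ival]
  | cons a t ih =>
    simp only [List.map_cons, Nat.ofDigits_cons, ival, ih]
    push_cast; ring

lemma ival_D3 (m : Int) (hm : 0 ≤ m) : ival (D3 m) = m := by
  have := ival_map_cast (Nat.digits 3 m.toNat)
  simpa [D3, Nat.ofDigits_digits, Int.toNat_of_nonneg hm] using this

lemma D3_digits_lt (m : Int) : ∀ d ∈ D3 m, 0 ≤ d ∧ d < 3 := by
  intro d hd
  simp only [D3, List.mem_map] at hd
  obtain ⟨a, ha, rfl⟩ := hd
  have := Nat.digits_lt_base (by norm_num : 1 < 3) ha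
  omega

lemma D3_nonpos (m : Int) (hm : m ≤ 0) : D3 m = [] := by
  have : m.toNat = 0 := by omega
  simp [D3, this]

lemma D3_ne_nil (m : Int) (hm : 0 < m) : D3 m ≠ [] := by
  simp only [D3, ne_eq, List.map_eq_nil_iff]
  exact Nat.digits_ne_nil_iff_ne_zero.mpr (by omega)

-- the B-side while loop is base-3 conversion
lemma b3_loop_eq (n : Int) (acc : List Int) : b3_loop n acc = acc ++ D3 n := by
  by_cases h : n > 0
  · rw [b3_loop]
    simp only [h, dif_pos]
    have h3 : (0:Int) < 3 := by norm_num
    have hrec := b3_loop_eq (PySem.Int.floordiv n 3) (acc ++ [PySem.Int.mod n 3])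
    rw [hrec, List.append_assoc]
    congr 1
    have hdig : Nat.digits 3 n.toNat = n.toNat % 3 :: Nat.digits 3 (n.toNat / 3) :=
      Nat.digits_def' (by norm_num) (by omega)
    have hmod : PySem.Int.mod n 3 = ((n.toNat % 3 : ℕ) : Int) := by
      rw [PySem.Int.mod_eq_emod_of_pos h3]; omega
    have hdiv : (PySem.Int.floordiv n 3).toNat = n.toNat / 3 := by
      rw [PySem.Int.floordiv_eq_ediv_of_pos h3]; omega
    simp only [D3, hdig, List.map_cons, hdiv, ← hmod, List.singleton_append]
  · rw [b3_loop]
    simp [h, D3_nonpos n (by omega)]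
termination_by n.toNat
decreasing_by
  simp only [PySem.Int.floordiv_eq_ediv_of_pos (by norm_num : (0:Int) < 3)]
  omega

-- the A-side conversion loop computes the same list
lemma to_base3_loop_eq (n : Int) (acc : List Int) : to_base3_loop n acc = b3_loop n acc := by
  by_cases h : n > 0
  · rw [to_base3_loop, b3_loop]
    simp only [h, dif_pos]
    exact to_base3_loop_eq _ _
  · rw [to_base3_loop, b3_loop]; simp [h]
termination_by n.toNat
decreasing_by
  simp only [PySem.Int.floordiv_eq_ediv_of_pos (by norm_num : (0:Int) < 3)]
  omega

lemma ival_take_succ (l : List Int) (k : Nat) (hk : k < l.length) :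
    ival (l.take (k + 1)) = ival (l.take k) + l[k] * 3 ^ k := by
  have h1 : l.take (k + 1) = l.take k ++ [l[k]] := by
    rw [List.take_succ, List.getElem?_eq_getElem hk]
    rfl
  rw [h1, ival_append_singleton, List.length_take, Nat.min_eq_left (le_of_lt hk)]

-- invariant of the carry-addition loop of A
lemma addStep_eval (ext : List Int) (st : List Int × Int) (i d_i d_prev : Int)
    (hdi : (PySem.List.pyGet? ext i).getD 0 = d_i)
    (hdp : (if i > 0 then (PySem.List.pyGet? ext (i - 1)).getD 0 else 0) = d_prev) :
    addStep ext st i =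
      (st.1 ++ [PySem.Int.mod (d_i + d_prev + st.2) 3],
        PySem.Int.floordiv (d_i + d_prev + st.2) 3) := by
  simp [addStep, hdi, hdp]

lemma fold_inv (ext : List Int) (hd : ∀ d ∈ ext, 0 ≤ d ∧ d < 3) (k : Nat) (hk : k ≤ ext.length) :
    ((PySem.List.pyRange 0 (k : Int) 1).foldl (addStep ext) ([], 0)).1.length = k ∧
    (∀ d ∈ ((PySem.List.pyRange 0 (k : Int) 1).foldl (addStep ext) ([], 0)).1, 0 ≤ d ∧ d < 3) ∧
    0 ≤ ((PySem.List.pyRange 0 (k : Int) 1).foldl (addStep ext) ([], 0)).2 ∧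
    ival ((PySem.List.pyRange 0 (k : Int) 1).foldl (addStep ext) ([], 0)).1 +
      ((PySem.List.pyRange 0 (k : Int) 1).foldl (addStep ext) ([], 0)).2 * 3 ^ k =
      ival (ext.take k) + 3 * ival (ext.take (k - 1)) := by
  induction k with
  | zero =>
    simp only [Nat.cast_zero]
    simp [PySem.List.pyRange_one_eq_nil (by omega : (0:Int) ≤ 0), ival]
  | succ k ih =>
    have hk' : k < ext.length := by omega
    obtain ⟨hlen, hdig, hc, hval⟩ := ih (by omega)
    obtain ⟨st, hst⟩ :
        ∃ st, st = (PySem.List.pyRange 0 (k : Int) 1).foldl (addStep ext) ([], 0) := ⟨_, rfl⟩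
    rw [← hst] at hlen hdig hc hval
    have hsplit : PySem.List.pyRange 0 ((k : Int) + 1) 1 =
        PySem.List.pyRange 0 (k : Int) 1 ++ [(k : Int)] :=
      PySem.List.pyRange_one_succ_right (by omega)
    have hcast : ((k + 1 : Nat) : Int) = (k : Int) + 1 := by push_cast; ring
    rw [hcast, hsplit, List.foldl_append, ← hst]
    simp only [List.foldl_cons, List.foldl_nil]
    have hdi : (PySem.List.pyGet? ext (k : Int)).getD 0 = ext[k] := by
      rw [PySem.List.pyGet?_natCast, List.getElem?_eq_getElem hk']
      rfl
    have hdi_mem := hd ext[k] (List.getElem_mem hk')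
    by_cases h0 : k = 0
    · subst h0
      rw [addStep_eval ext st (((0:Nat)):Int) ext[0] 0 hdi (if_neg (by omega))]
      have h3 : (0:Int) < 3 := by norm_num
      have hmodnn := PySem.Int.mod_nonneg (a := ext[0] + 0 + st.2) h3
      have hmodlt := PySem.Int.mod_lt (a := ext[0] + 0 + st.2) h3
      have hdm := PySem.Int.floordiv_mul_add_mod (ext[0] + 0 + st.2) 3
      have hfd : 0 ≤ PySem.Int.floordiv (ext[0] + 0 + st.2) 3 := by
        rw [PySem.Int.floordiv_eq_ediv_of_pos h3]
        exact Int.ediv_nonneg (by omega) (by norm_num)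
      refine ⟨by simp [hlen], ?_, hfd, ?_⟩
      · intro d hdm'
        rcases List.mem_append.mp hdm' with h | h
        · exact hdig d h
        · simp at h; omega
      · rw [ival_append_singleton, hlen, ival_take_succ ext 0 hk']
        have h0' : ival (ext.take 0) = 0 := by simp [ival]
        simp only [h0', Nat.zero_sub, zero_add, pow_zero, pow_one, mul_one] at hval ⊢
        omega
    · have hkpos : ((k : Int)) > 0 := by omega
      have hk1 : k - 1 < ext.length := by omega
      have hprev : (if ((k:Int)) > 0 then (PySem.List.pyGet? ext ((k : Int) - 1)).getD 0 else 0) =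
          ext[k - 1] := by
        rw [if_pos hkpos]
        have : (k : Int) - 1 = ((k - 1 : Nat) : Int) := by omega
        rw [this, PySem.List.pyGet?_natCast, List.getElem?_eq_getElem hk1]
        rfl
      rw [addStep_eval ext st (k : Int) ext[k] ext[k-1] hdi hprev]
      have hprev_mem := hd ext[k-1] (List.getElem_mem hk1)
      have h3 : (0:Int) < 3 := by norm_num
      have hmodnn := PySem.Int.mod_nonneg (a := ext[k] + ext[k-1] + st.2) h3
      have hmodlt := PySem.Int.mod_lt (a := ext[k] + ext[k-1] + st.2) h3
      have hdm := PySem.Int.floordiv_mul_add_mod (ext[k] + ext[k-1] + st.2) 3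
      have hfd : 0 ≤ PySem.Int.floordiv (ext[k] + ext[k-1] + st.2) 3 := by
        rw [PySem.Int.floordiv_eq_ediv_of_pos h3]
        exact Int.ediv_nonneg (by omega) (by norm_num)
      refine ⟨by simp [hlen], ?_, hfd, ?_⟩
      · intro d hdm'
        rcases List.mem_append.mp hdm' with h | h
        · exact hdig d h
        · simp at h; omega
      · rw [ival_append_singleton, hlen, ival_take_succ ext k hk',
          show k + 1 - 1 = k from by omega]
        have htk : ival (ext.take k) = ival (ext.take (k - 1)) + ext[k - 1] * 3 ^ (k - 1) := by
          have := ival_take_succ ext (k - 1) hk1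
          rw [show k - 1 + 1 = k by omega] at this
          exact this
        have hsum : PySem.Int.mod (ext[k] + ext[k-1] + st.2) 3 +
            3 * PySem.Int.floordiv (ext[k] + ext[k-1] + st.2) 3 =
            ext[k] + ext[k-1] + st.2 := by omega
        have hpow : (3:Int) ^ k = 3 * 3 ^ (k - 1) := by
          rw [← pow_succ']
          congr 1
          omega
        have hpow2 : (3:Int) ^ (k + 1) = 9 * 3 ^ (k - 1) := by
          rw [pow_succ, hpow]; ring
        rw [hpow] at hval
        rw [hpow, hpow2]
        linear_combination hval + 3 * (3:Int) ^ (k - 1) * hsum - 3 * htk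

lemma trimZeros_two : trimZeros [0, 0] = [0] := by
  rw [trimZeros, dif_pos (by decide)]
  show trimZeros [0] = [0]
  rw [trimZeros, dif_neg (by decide)]

lemma trimZeros_three : trimZeros [0, 0, 0] = [0] := by
  rw [trimZeros, dif_pos (by decide)]
  show trimZeros [0, 0] = [0]
  exact trimZeros_two

lemma ival_trim (r : List Int) (hr : r ≠ []) :
    trimZeros r ≠ [] ∧ ival (trimZeros r) = ival r ∧
    (∀ d ∈ trimZeros r, d ∈ r) ∧
    (trimZeros r = [0] ∨ (trimZeros r).getLast? ≠ some 0) := by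
  rw [trimZeros]
  by_cases h : r.length > 1 ∧ (PySem.List.pyGet? r (-1)).getD 0 = 0
  · rw [dif_pos h]
    have hlast : r.getLast hr = 0 := by
      have := PySem.List.pyGet?_neg_one (xs := r)
      rw [this, List.getLast?_eq_getLast hr] at h
      simpa using h.2
    have hdrop : r = r.dropLast ++ [0] := by
      conv_lhs => rw [← List.dropLast_concat_getLast hr]
      rw [hlast]
    have hne : r.dropLast ≠ [] := by
      intro hnil
      have := h.1
      rw [← List.dropLast_concat_getLast hr] at this
      simp [hnil] at this
    obtain ⟨h1, h2, h3, h4⟩ := ival_trim r.dropLast hne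
    refine ⟨h1, ?_, ?_, h4⟩
    · rw [h2]
      conv_rhs => rw [hdrop]
      rw [ival_append_singleton]
      ring
    · intro d hd
      rw [hdrop]
      exact List.mem_append_left _ (h3 d hd)
  · rw [dif_neg h]
    refine ⟨hr, rfl, fun d hd => hd, ?_⟩
    rcases Decidable.em (r.getLast? = some 0) with hl | hl
    · left
      have hlen : r.length = 1 := by
        by_contra hlen
        apply h
        refine ⟨?_, ?_⟩
        · rcases r with _ | ⟨a, _ | t⟩ <;> simp_all
        · rw [PySem.List.pyGet?_neg_one, hl]; rfl
      rcases r with _ | ⟨a, t⟩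
      · simp at hr
      · have : t = [] := by simpa using hlen
        subst this
        simp at hl
        simp [hl]
    · right; exact hl
termination_by r.length
decreasing_by
  obtain ⟨hgt, -⟩ := h
  simp only [List.length_dropLast]
  omega

-- uniqueness of base-3 digit lists with no trailing zero
lemma digits_unique (l : List Int) (hd : ∀ d ∈ l, 0 ≤ d ∧ d < 3)
    (hl : l.getLast? ≠ some 0) : l = D3 (ival l) := by
  induction l with
  | nil => simp [ival, D3]
  | cons a t ih =>
    have ha := hd a (by simp)
    have hvt : 0 ≤ ival t := ival_nonneg t (fun d h => hd d (by simp [h]))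
    by_cases ht : t = []
    · subst ht
      have hane : a ≠ 0 := by simpa using hl
      have hv : ival [a] = a := by simp [ival]
      rw [hv]
      have hdig : Nat.digits 3 a.toNat = a.toNat % 3 :: Nat.digits 3 (a.toNat / 3) :=
        Nat.digits_def' (by norm_num) (by omega)
      have h1 : a.toNat % 3 = a.toNat := by omega
      have h2 : a.toNat / 3 = 0 := by omega
      simp [D3, hdig, h1, h2]
      omega
    · have hlast : t.getLast? ≠ some 0 := by
        have hcons : (a :: t).getLast? = t.getLast? := by
          rw [show a :: t = [a] ++ t from rfl]
          exact List.getLast?_append_of_ne_nil _ ht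
        rwa [hcons] at hl
      have iht := ih (fun d h => hd d (by simp [h])) hlast
      have hvtpos : 0 < ival t := by
        rcases lt_or_eq_of_le hvt with h | h
        · exact h
        · exfalso
          rw [← h] at iht
          have : D3 0 = [] := by simp [D3]
          rw [this] at iht
          exact ht iht
      have hv : ival (a :: t) = a + 3 * ival t := rfl
      rw [hv]
      have hpos : 0 < a + 3 * ival t := by omega
      have hdig : Nat.digits 3 (a + 3 * ival t).toNat =
          (a + 3 * ival t).toNat % 3 :: Nat.digits 3 ((a + 3 * ival t).toNat / 3) :=
        Nat.digits_def' (by norm_num) (by omega)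
      have h1 : (a + 3 * ival t).toNat % 3 = a.toNat := by omega
      have h2 : ((a + 3 * ival t).toNat / 3 : ℕ) = (ival t).toNat := by omega
      have hD : D3 (a + 3 * ival t) = a :: D3 (ival t) := by
        simp only [D3, hdig, h1, h2, List.map_cons]
        congr 1
        omega
      rw [hD, ← iht]

-- A agrees with B on positive x
lemma pos_case (x : Int) (hx : 0 < x) : multiply_by_4 x = multiply_by_4_alt x := by
  have hx0 : x ≠ 0 := by omega
  -- B side
  have hBne := D3_ne_nil (4 * x) (by omega)
  have hB : multiply_by_4_alt x = D3 (4 * x) := by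
    simp [multiply_by_4_alt, b3_loop_eq, hBne]
  -- A side
  have hA3 : to_base3 x = D3 x := by
    simp [to_base3, hx0, to_base3_loop_eq, b3_loop_eq]
  rw [multiply_by_4, hB]
  simp only [hA3]
  set L := (D3 x).length with hL
  set ext := D3 x ++ List.replicate (L + 2 - L) 0 with hext
  have hextL : ext.length = L + 2 := by rw [hext]; simp; omega
  have hext_digits : ∀ d ∈ ext, 0 ≤ d ∧ d < 3 := by
    intro d hdm
    rcases List.mem_append.mp hdm with h | h
    · exact D3_digits_lt x d h
    · have := List.eq_of_mem_replicate h
      omega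
  obtain ⟨hlen, hdig, hc, hval⟩ := fold_inv ext hext_digits (L + 2) (by omega)
  set st := (PySem.List.pyRange 0 ((L + 2 : Nat) : Int) 1).foldl (addStep ext) ([], 0) with hst
  -- the value identities
  have htake2 : ext.take (L + 2) = ext := by
    rw [List.take_of_length_le]; omega
  have htake1 : ext.take (L + 1) = D3 x ++ [0] := by
    rw [hext, List.take_append]
    congr 1
    · exact List.take_of_length_le (by omega)
    · rw [show L + 2 - L = 2 from by omega, show L + 1 - (D3 x).length = 1 from by omega]
      rfl
  have hivx : ival (D3 x) = x := ival_D3 x (by omega)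
  have hive : ival ext = x := by
    rw [hext]
    have : (L + 2 - L) = 2 := by omega
    rw [this]
    show ival (D3 x ++ [0, 0]) = x
    rw [show (D3 x ++ [0, 0]) = (D3 x ++ [0]) ++ [0] by simp]
    rw [ival_append_singleton, ival_append_singleton]
    simp [hivx]
  have hive1 : ival (ext.take (L + 1)) = x := by
    rw [htake1, ival_append_singleton]
    simp [hivx]
  rw [htake2, show L + 2 - 1 = L + 1 by omega] at hval
  rw [hive, hive1] at hval
  -- carry is zero at the end
  have hxlt : x < 3 ^ L := by
    have hlenL : (Nat.digits 3 x.toNat).length = L := by simp [hL, D3]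
    have h1 : x.toNat < 3 ^ (Nat.digits 3 x.toNat).length :=
      Nat.lt_base_pow_length_digits (by norm_num)
    rw [hlenL] at h1
    have hcast : ((x.toNat : Int)) = x := Int.toNat_of_nonneg (by omega)
    calc x = (x.toNat : Int) := hcast.symm
      _ < ((3 ^ L : ℕ) : Int) := by exact_mod_cast h1
      _ = 3 ^ L := by push_cast; ring
  have hrnn : 0 ≤ ival st.1 := ival_nonneg _ hdig
  have hcz : st.2 = 0 := by
    by_contra hne
    have hc1 : 1 ≤ st.2 := by omega
    have hp : (0:Int) < 3 ^ L := by positivity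
    have : (3:Int) ^ (L + 2) ≤ st.2 * 3 ^ (L + 2) := by
      nlinarith [pow_pos (show (0:Int) < 3 by norm_num) (L + 2)]
    have h4x : x + 3 * x < 3 ^ (L + 2) := by
      have : (3:Int) ^ (L + 2) = 9 * 3 ^ L := by ring
      nlinarith
    omega
  have hivr : ival st.1 = 4 * x := by
    rw [hcz] at hval
    simp at hval
    omega
  -- the trimmed result is the digit list of 4x
  have hstne : st.1 ≠ [] := by
    intro hnil
    rw [hnil] at hlen
    simp at hlen
  obtain ⟨t1, t2, t3, t4⟩ := ival_trim st.1 hstne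
  have htd : ∀ d ∈ trimZeros st.1, 0 ≤ d ∧ d < 3 := fun d h => hdig d (t3 d h)
  have htlast : (trimZeros st.1).getLast? ≠ some 0 := by
    rcases t4 with h | h
    · exfalso
      rw [h] at t2
      simp [ival] at t2
      omega
    · exact h
  have := digits_unique (trimZeros st.1) htd htlast
  rw [t2, hivr] at this
  exact this

-- ===== VERDICT (by name: the statement is the Claim_ definition above) =====
theorem multiply_by_4_spec : Claim_equal_multiply_by_4 := by
  intro x _
  unfold Spec_multiply_by_4
  rcases lt_trichotomy x 0 with hx | hx | hx
  · -- x < 0 : A's to_base3 returns [], the rest is a closed computation giving [0]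
    have hA3 : to_base3 x = [] := by
      rw [to_base3, if_neg (by omega)]
      rw [to_base3_loop]
      simp [show ¬ (x > 0) by omega]
    have hB : multiply_by_4_alt x = [0] := by
      simp [multiply_by_4_alt, b3_loop_eq, D3_nonpos (4 * x) (by omega)]
    rw [multiply_by_4, hA3, hB]
    have hres : (List.foldl (addStep ([] ++ List.replicate (([]:List Int).length + 2 - ([]:List Int).length) 0)) ([], 0)
        (PySem.List.pyRange 0 ((([]:List Int).length + 2 : Nat) : Int) 1)).1 = [0, 0] := rfl
    rw [hres, trimZeros_two]
  · subst hx
    have hA : multiply_by_4 0 = trimZeros [0, 0, 0] := rfl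
    have hB : multiply_by_4_alt 0 = [0] := by
      have hD0 : D3 0 = [] := by simp [D3]
      simp [multiply_by_4_alt, b3_loop_eq, hD0]
    rw [hA, hB, trimZeros_three]
  · exact pos_case x hx
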